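-- pv_equiv track=rewrite | github.com/AdithyaRajagopalan24/LeetcodeAnswers | 3797-count-routes-to-climb-a-rectangular-grid/3797-count-routes-to-climb-a-rectangular-grid.py | numberOfRoutes
-- ===== SOURCE A (Python) =====
-- from typing import List
--
-- def numberOfRoutes(grid: List[str], maxDist: int) -> int:
--     mod = 1000000007
--     rows = len(grid)
--     cols = len(grid[0])
--
--     prevRoutes = [0] * cols
--
--     for col in range(cols):
--         if grid[0][col] == '#':
--             continue
--         safeRoutes = 0
--         for j in range(col + 1, min(col + maxDist, cols - 1) + 1):
--             if grid[0][j] != '#':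
--                 safeRoutes += 1
--         for j in range(max(0, col - maxDist), col):
--             if grid[0][j] != '#':
--                 safeRoutes += 1
--         prevRoutes[col] = safeRoutes + 1
--
--     maxColDist = 0
--     for col in range(cols):
--         distSquared = 1 + col * col
--         if distSquared <= maxDist * maxDist:
--             maxColDist = col
--         else:
--             break
--
--     for row in range(1, rows):
--         for col in range(1, cols):
--             prevRoutes[col] = (prevRoutes[col] + prevRoutes[col - 1]) % mod
--
--         prefRoutes = [0] * cols
--         for col in range(cols):
--             if grid[row][col] == '#':
--                 continue
--             lastCol = min(col + maxColDist, cols - 1)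
--             prefRoutes[col] = prevRoutes[lastCol]
--             if col > maxColDist:
--                 prefRoutes[col] = (prefRoutes[col] - prevRoutes[col - maxColDist - 1]) % mod
--
--         for col in range(1, cols):
--             prefRoutes[col] = (prefRoutes[col] + prefRoutes[col - 1]) % mod
--
--         curRoutes = [0] * cols
--         for col in range(cols):
--             if grid[row][col] == '#':
--                 continue
--             curRoutes[col] = prefRoutes[min(col + maxDist, cols - 1)]
--             if col > maxDist:
--                 curRoutes[col] = (curRoutes[col] - prefRoutes[col - maxDist - 1]) % mod
--
--         prevRoutes = curRoutes
--
--     return sum(prevRoutes) % mod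
-- ===== SOURCE B (Python) =====
-- from typing import List
--
-- MOD = 1000000007
--
-- def _window(vals: List[int], mask: List[bool], d: int) -> List[int]:
--     # out[c] = (sum of vals over the clamped window [c-d, c+d]) % MOD where mask[c], else 0,
--     # maintained as a sliding sum (add the entering cell, drop the leaving one).
--     n = len(vals)
--     out = [0] * n
--     s = sum(vals[0:min(d, n - 1) + 1])
--     for c in range(n):
--         if c > 0:
--             hi = c + d
--             if hi <= n - 1:
--                 s += vals[hi]
--             lo = c - d - 1
--             if lo >= 0:
--                 s -= vals[lo]
--         if mask[c]:
--             out[c] = s % MOD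
--     return out
--
-- def numberOfRoutes(grid: List[str], maxDist: int) -> int:
--     cols = len(grid[0])
--     mask0 = [grid[0][c] != '#' for c in range(cols)]
--     routes = _window([1 if m else 0 for m in mask0], mask0, maxDist)
--     # largest column offset d with 1 + d*d <= maxDist*maxDist, capped at cols-1:
--     # counted directly instead of scanning with a break.
--     dcol = sum(1 for c in range(1, cols) if 1 + c * c <= maxDist * maxDist)
--     for r in range(1, len(grid)):
--         mask = [grid[r][c] != '#' for c in range(cols)]
--         routes = _window(_window(routes, mask, dcol), mask, maxDist)
--     return sum(routes) % MOD
-- ===== Notes on version B (the rewrite author's own statement) =====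
-- stated objective: alternative
-- what changed: B computes each row (including the first, which A scans window-by-window) with a single sliding-window pass that adds the entering cell and drops the leaving one, instead of A's per-cell scans and prefix/difference arrays, and replaces A's break-scan for the column radius by a direct count.
-- outside the precondition, e.g. on numberOfRoutes(['..'], -1): A returns 2, B returns 0; on numberOfRoutes(['...'], -2): A returns 3, B raises IndexError; on numberOfRoutes(['..', '.'], 2): A raises IndexError, B raises IndexError
import Mathlib
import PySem

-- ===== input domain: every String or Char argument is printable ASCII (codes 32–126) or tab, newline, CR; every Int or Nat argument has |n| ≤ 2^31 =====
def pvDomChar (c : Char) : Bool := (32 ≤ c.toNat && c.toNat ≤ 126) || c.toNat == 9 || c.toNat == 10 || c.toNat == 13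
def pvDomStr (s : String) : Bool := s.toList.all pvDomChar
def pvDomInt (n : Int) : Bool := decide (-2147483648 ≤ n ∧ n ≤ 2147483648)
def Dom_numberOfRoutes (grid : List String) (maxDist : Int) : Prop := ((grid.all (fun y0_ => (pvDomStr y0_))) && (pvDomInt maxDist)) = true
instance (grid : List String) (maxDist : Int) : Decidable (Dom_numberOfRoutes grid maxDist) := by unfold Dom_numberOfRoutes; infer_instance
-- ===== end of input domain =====

-- B computes each row (including the first, which A scans window-by-window) with a single
-- sliding-window pass keeping a running sum, and counts the column radius directly instead of
-- A's break-scan; equivalence is proved for non-negative maxDist on grids whose rows are at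
-- least as long as the first row.

-- ===== PORT A =====
def pvMod : Int := 1000000007

-- for j in range(..): if grid[0][j] != '#': safeRoutes += 1
def pvCountSafe (row : List Char) (js : List Int) : Int :=
  js.foldl (fun acc j => if row.getD j.toNat '#' ≠ '#' then acc + 1 else acc) 0

-- A's first loop: prevRoutes[col] = safeRoutes + 1 on safe cells, 0 elsewhere
def pvFirstRowA (row : List Char) (maxDist : Int) (cols : Nat) : List Int :=
  (List.range cols).map (fun col =>
    if row.getD col '#' = '#' then 0
    else
      pvCountSafe row (PySem.List.pyRange ((col : Int) + 1) (min ((col : Int) + maxDist) ((cols : Int) - 1) + 1) 1)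
      + pvCountSafe row (PySem.List.pyRange (max 0 ((col : Int) - maxDist)) (col : Int) 1)
      + 1)

-- A's maxColDist loop with its break
def pvMaxColLoop (M2 : Int) : List Nat → Nat → Nat
  | [], acc => acc
  | c :: rest, acc => if 1 + (c : Int) * (c : Int) ≤ M2 then pvMaxColLoop M2 rest c else acc

-- in-place prefix loop: for col in range(1, cols): v[col] = (v[col] + v[col-1]) % mod
def pvPrefScan (acc : Int) : List Int → List Int
  | [] => []
  | y :: ys => PySem.Int.mod (y + acc) pvMod :: pvPrefScan (PySem.Int.mod (y + acc) pvMod) ys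

def pvPrefixA (v : List Int) : List Int :=
  match v with
  | [] => []
  | x :: xs => x :: pvPrefScan x xs

-- A repeats this loop shape twice per row (radius maxColDist, then radius maxDist):
-- out[col] = P[min(col+d, cols-1)], minus P[col-d-1] mod m when col > d; 0 on blocked cells
def pvStageA (rowc : List Char) (P : List Int) (d : Int) (cols : Nat) : List Int :=
  (List.range cols).map (fun col =>
    if rowc.getD col '#' = '#' then 0
    else
      if (col : Int) > d then
        PySem.Int.mod (P.getD (min ((col : Int) + d) ((cols : Int) - 1)).toNat 0
          - P.getD ((col : Int) - d - 1).toNat 0) pvMod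
      else P.getD (min ((col : Int) + d) ((cols : Int) - 1)).toNat 0)

-- for row in range(1, rows): ...
def pvLoopA (maxDist dcol : Int) (cols : Nat) : List String → List Int → List Int
  | [], prev => prev
  | srow :: rest, prev =>
      pvLoopA maxDist dcol cols rest
        (pvStageA srow.toList (pvPrefixA (pvStageA srow.toList (pvPrefixA prev) dcol cols)) maxDist cols)

def numberOfRoutes (grid : List String) (maxDist : Int) : Int :=
  PySem.Int.mod
    (pvLoopA maxDist
      ((pvMaxColLoop (maxDist * maxDist) (List.range (grid.headD "").toList.length) 0 : Nat) : Int)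
      (grid.headD "").toList.length grid.tail
      (pvFirstRowA (grid.headD "").toList maxDist (grid.headD "").toList.length)).sum pvMod

-- ===== PORT B =====
def pvMask (rowc : List Char) (cols : Nat) : List Bool :=
  (List.range cols).map (fun c => rowc.getD c '#' != '#')

-- Source B's per-step update of the running window sum s (the body of `if c > 0:`)
def pvStep (vals : List Int) (d : Int) (n c : Nat) (s : Int) : Int :=
  if 0 < c then
    if 0 ≤ (c : Int) - d - 1 then
      (if (c : Int) + d ≤ (n : Int) - 1 then s + vals.getD ((c : Int) + d).toNat 0 else s)
        - vals.getD ((c : Int) - d - 1).toNat 0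
    else
      (if (c : Int) + d ≤ (n : Int) - 1 then s + vals.getD ((c : Int) + d).toNat 0 else s)
  else s

-- sliding-window pass of Source B's _window
def pvWindowGo (vals : List Int) (mask : List Bool) (d : Int) (n c : Nat) (s : Int) : List Int :=
  if h : c < n then
    (if mask.getD c false then PySem.Int.mod (pvStep vals d n c s) pvMod else 0)
      :: pvWindowGo vals mask d n (c + 1) (pvStep vals d n c s)
  else []
termination_by n - c

def pvWindowB (vals : List Int) (mask : List Bool) (d : Int) : List Int :=
  pvWindowGo vals mask d vals.length 0
    (PySem.List.slice vals (some 0) (some (min d ((vals.length : Int) - 1) + 1))).sum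

def pvLoopB (maxDist dcol : Int) (cols : Nat) : List String → List Int → List Int
  | [], routes => routes
  | srow :: rest, routes =>
      pvLoopB maxDist dcol cols rest
        (pvWindowB (pvWindowB routes (pvMask srow.toList cols) dcol) (pvMask srow.toList cols) maxDist)

def numberOfRoutes_alt (grid : List String) (maxDist : Int) : Int :=
  PySem.Int.mod
    (pvLoopB maxDist
      (((PySem.List.pyRange 1 ((grid.headD "").toList.length : Int) 1).countP
          (fun c => decide (1 + c * c ≤ maxDist * maxDist)) : Nat) : Int)
      (grid.headD "").toList.length grid.tail
      (pvWindowB ((pvMask (grid.headD "").toList (grid.headD "").toList.length).map (fun m => if m then (1 : Int) else 0))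
        (pvMask (grid.headD "").toList (grid.headD "").toList.length) maxDist)).sum pvMod

-- ===== PRECONDITION & SPEC =====
-- Pre_ excludes: the empty grid and rows shorter than the first row (there A raises IndexError),
-- and negative maxDist — outside the natural domain of a distance bound — where A either raises
-- IndexError or returns values produced by Python negative-index wraparound.
def Pre_numberOfRoutes (grid : List String) (maxDist : Int) : Prop :=
  grid ≠ [] ∧ 0 ≤ maxDist ∧ ∀ s ∈ grid, (grid.headD "").toList.length ≤ s.toList.length
instance (grid : List String) (maxDist : Int) : Decidable (Pre_numberOfRoutes grid maxDist) := by
  unfold Pre_numberOfRoutes; infer_instance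

def pvWitness_numberOfRoutes : List String × Int := (["..#.", "...#", "...."], 2)

def Spec_numberOfRoutes (grid : List String) (maxDist : Int) (out : Int) : Prop := out = numberOfRoutes_alt grid maxDist
instance (grid : List String) (maxDist : Int) (out : Int) : Decidable (Spec_numberOfRoutes grid maxDist out) := by unfold Spec_numberOfRoutes; infer_instance

-- ===== CLAIM (what is proved, stated in full; the proofs are below) =====
def Claim_equal_numberOfRoutes : Prop := ∀ (grid : List String) (maxDist : Int), Dom_numberOfRoutes grid maxDist → Pre_numberOfRoutes grid maxDist → Spec_numberOfRoutes grid maxDist (numberOfRoutes grid maxDist)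

-- ===== LEMMAS AND PROOFS =====
theorem pv_witness_ok :
    Dom_numberOfRoutes pvWitness_numberOfRoutes.1 pvWitness_numberOfRoutes.2 ∧
    Pre_numberOfRoutes pvWitness_numberOfRoutes.1 pvWitness_numberOfRoutes.2 := by decide

-- prefix sums of a list, and the clamped masked window sum both pipelines compute per row
def pvS (v : List Int) (k : Nat) : Int := (v.take k).sum

def pvW (v : List Int) (D n c : Nat) : Int :=
  pvS v (min (c + D) (n - 1) + 1) - pvS v (c - D)

theorem pvMod_pos : 0 < pvMod := by norm_num [pvMod]

theorem pvMod_modEq (x : Int) : PySem.Int.mod x pvMod ≡ x [ZMOD pvMod] := by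
  rw [PySem.Int.mod_eq_emod_of_pos pvMod_pos]
  exact Int.mod_modEq x pvMod

theorem pvS_succ (v : List Int) (k : Nat) (h : k < v.length) :
    pvS v (k + 1) = pvS v k + v.getD k 0 := by
  unfold pvS
  rw [List.getD_eq_getElem?_getD, List.getElem?_eq_getElem h]
  simp [List.sum_take_succ _ _ h]

theorem pvS_congr (v w : List Int) (hl : v.length = w.length)
    (h : ∀ k, k < v.length → v.getD k 0 ≡ w.getD k 0 [ZMOD pvMod]) :
    ∀ t, pvS v t ≡ pvS w t [ZMOD pvMod] := by
  intro t
  induction t with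
  | zero => simp [pvS]
  | succ t ih =>
    by_cases ht : t < v.length
    · rw [pvS_succ v t ht, pvS_succ w t (hl ▸ ht)]
      exact Int.ModEq.add ih (h t ht)
    · have h1 : pvS v (t + 1) = pvS v t := by
        unfold pvS; rw [List.take_of_length_le (by omega), List.take_of_length_le (by omega)]
      have h2 : pvS w (t + 1) = pvS w t := by
        unfold pvS; rw [List.take_of_length_le (by omega), List.take_of_length_le (by omega)]
      rw [h1, h2]; exact ih

theorem pvW_congr (v w : List Int) (D n c : Nat) (hl : v.length = w.length)
    (h : ∀ k, k < v.length → v.getD k 0 ≡ w.getD k 0 [ZMOD pvMod]) :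
    pvW v D n c ≡ pvW w D n c [ZMOD pvMod] :=
  Int.ModEq.sub (pvS_congr v w hl h _) (pvS_congr v w hl h _)

theorem pvPrefScan_length (ys : List Int) (acc : Int) : (pvPrefScan acc ys).length = ys.length := by
  induction ys generalizing acc <;> simp [pvPrefScan, *]

theorem pvPrefScan_getD (ys : List Int) (acc : Int) (k : Nat) (h : k < ys.length) :
    (pvPrefScan acc ys).getD k 0 ≡ acc + pvS ys (k + 1) [ZMOD pvMod] := by
  induction ys generalizing acc k with
  | nil => simp at h
  | cons y ys ih =>
    cases k with
    | zero =>
      have h1 : pvS (y :: ys) 1 = y := by simp [pvS]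
      simp only [pvPrefScan, List.getD_cons_zero, h1]
      simpa [add_comm] using pvMod_modEq (y + acc)
    | succ k =>
      have hk : k < ys.length := by simpa using h
      have h0 := ih (PySem.Int.mod (y + acc) pvMod) k hk
      have h2 : PySem.Int.mod (y + acc) pvMod + pvS ys (k + 1) ≡ (y + acc) + pvS ys (k + 1) [ZMOD pvMod] :=
        Int.ModEq.add_right _ (pvMod_modEq _)
      have h3 : pvS (y :: ys) (k + 2) = y + pvS ys (k + 1) := by simp [pvS]
      have h4 : (y + acc) + pvS ys (k + 1) = acc + pvS (y :: ys) (k + 2) := by rw [h3]; ring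
      simp only [pvPrefScan, List.getD_cons_succ]
      exact h4 ▸ (h0.trans h2)

theorem pvPrefixA_length (v : List Int) : (pvPrefixA v).length = v.length := by
  cases v <;> simp [pvPrefixA, pvPrefScan_length]

theorem pvPrefixA_getD (v : List Int) (k : Nat) (h : k < v.length) :
    (pvPrefixA v).getD k 0 ≡ pvS v (k + 1) [ZMOD pvMod] := by
  cases v with
  | nil => simp at h
  | cons x xs =>
    cases k with
    | zero => simp [pvPrefixA, pvS]
    | succ k =>
      have hk : k < xs.length := by simpa using h
      have h0 := pvPrefScan_getD xs x k hk
      have h3 : pvS (x :: xs) (k + 2) = x + pvS xs (k + 1) := by simp [pvS]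
      simpa [pvPrefixA, h3] using h0

theorem pvStageA_length (rowc : List Char) (P : List Int) (d : Int) (n : Nat) :
    (pvStageA rowc P d n).length = n := by simp [pvStageA]

theorem pvStageA_spec (rowc : List Char) (v : List Int) (d : Int) (n c : Nat)
    (hd : 0 ≤ d) (hn : v.length = n) (hc : c < n) :
    (pvStageA rowc (pvPrefixA v) d n).getD c 0 ≡
      (if rowc.getD c '#' = '#' then 0 else pvW v d.toNat n c) [ZMOD pvMod] := by
  rw [pvStageA, PySem.List.getD_map_range _ n c 0 hc]
  by_cases hb : rowc.getD c '#' = '#'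
  · rw [if_pos hb, if_pos hb]
  · rw [if_neg hb, if_neg hb]
    have hmin : (min ((c : Int) + d) ((n : Int) - 1)).toNat = min (c + d.toNat) (n - 1) := by omega
    have hhi : min (c + d.toNat) (n - 1) < (pvPrefixA v).length := by rw [pvPrefixA_length]; omega
    have hP := pvPrefixA_getD v _ (by rw [pvPrefixA_length] at hhi; exact hhi)
    by_cases hgt : (c : Int) > d
    · have hlt : d.toNat < c := by omega
      have hidx : ((c : Int) - d - 1).toNat = c - d.toNat - 1 := by omega
      have hlo : c - d.toNat - 1 < v.length := by omega
      have hPl := pvPrefixA_getD v _ hlo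
      have hW : pvW v d.toNat n c = pvS v (min (c + d.toNat) (n - 1) + 1) - pvS v (c - d.toNat - 1 + 1) := by
        rw [pvW]; congr 2; omega
      rw [if_pos hgt, hmin, hidx, hW]
      exact (pvMod_modEq _).trans (Int.ModEq.sub hP hPl)
    · have hcd : c - d.toNat = 0 := by omega
      have hW : pvW v d.toNat n c = pvS v (min (c + d.toNat) (n - 1) + 1) := by
        rw [pvW, hcd]; simp [pvS]
      rw [if_neg hgt, hmin, hW]
      exact hP

theorem pvW_step (v : List Int) (D n c : Nat) (h1 : 1 ≤ c) (hc : c < n) (hn : v.length = n) :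
    pvW v D n c =
      (if c + D ≤ n - 1 then pvW v D n (c - 1) + v.getD (c + D) 0 else pvW v D n (c - 1))
        - (if D < c then v.getD (c - D - 1) 0 else 0) := by
  have Hhi : pvS v (min (c + D) (n - 1) + 1)
      = pvS v (min (c - 1 + D) (n - 1) + 1) + (if c + D ≤ n - 1 then v.getD (c + D) 0 else 0) := by
    by_cases hH : c + D ≤ n - 1
    · have e1 : min (c + D) (n - 1) = c + D := by omega
      have e2 : min (c - 1 + D) (n - 1) + 1 = c + D := by omega
      rw [e1, e2, if_pos hH, pvS_succ v (c + D) (by omega)]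
    · have e1 : min (c + D) (n - 1) = n - 1 := by omega
      have e2 : min (c - 1 + D) (n - 1) = n - 1 := by omega
      rw [e1, e2, if_neg hH, add_zero]
  have Hlo : pvS v (c - D) = pvS v (c - 1 - D) + (if D < c then v.getD (c - D - 1) 0 else 0) := by
    by_cases hD : D < c
    · have e : c - D = (c - D - 1) + 1 := by omega
      have e2 : c - D - 1 = c - 1 - D := by omega
      rw [if_pos hD, e, pvS_succ v _ (by omega), e2]
      simp
    · have e : c - D = 0 := by omega
      have e2 : c - 1 - D = 0 := by omega
      rw [if_neg hD, e, e2, add_zero]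
  simp only [pvW]
  rw [Hhi, Hlo]
  split_ifs <;> ring

theorem pvStep_spec (v : List Int) (d : Int) (n c : Nat) (s : Int)
    (hd : 0 ≤ d) (hc : c < n) (hn : v.length = n)
    (hs : s = pvW v d.toNat n (c - 1)) :
    pvStep v d n c s = pvW v d.toNat n c := by
  unfold pvStep
  by_cases h0 : 0 < c
  · rw [if_pos h0]
    have hD : ((c : Int) + d).toNat = c + d.toNat := by omega
    have hidx2 : ((c : Int) - d - 1).toNat = c - d.toNat - 1 := by omega
    have hA : ((c : Int) + d ≤ (n : Int) - 1) ↔ c + d.toNat ≤ n - 1 := by omega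
    have hB : (0 ≤ (c : Int) - d - 1) ↔ d.toNat < c := by omega
    rw [pvW_step v d.toNat n c h0 hc hn, hs]
    simp only [hD, hidx2, hA, hB]
    split_ifs <;> ring
  · rw [if_neg h0]
    have : c = 0 := by omega
    subst this
    exact hs

theorem pvWindowGo_spec (v : List Int) (mask : List Bool) (d : Int) (hd : 0 ≤ d) (n : Nat)
    (hn : v.length = n) :
    ∀ fuel c s, n - c = fuel → s = pvW v d.toNat n (c - 1) →
      pvWindowGo v mask d n c s =
        (List.range' c (n - c)).map
          (fun k => if mask.getD k false then PySem.Int.mod (pvW v d.toNat n k) pvMod else 0) := by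
  intro fuel
  induction fuel with
  | zero =>
    intro c s hfc hs
    rw [pvWindowGo, dif_neg (by omega)]
    rw [show n - c = 0 from hfc]
    simp
  | succ fuel ih =>
    intro c s hfc hs
    have hc : c < n := by omega
    rw [pvWindowGo, dif_pos hc, pvStep_spec v d n c s hd hc hn hs]
    rw [ih (c + 1) _ (by omega) (by simp)]
    rw [show n - c = (n - (c + 1)) + 1 from by omega, List.range'_succ, List.map_cons]

theorem pvWindowB_spec (v : List Int) (mask : List Bool) (d : Int) (hd : 0 ≤ d) :
    pvWindowB v mask d =
      (List.range v.length).map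
        (fun k => if mask.getD k false then PySem.Int.mod (pvW v d.toNat v.length k) pvMod else 0) := by
  unfold pvWindowB
  have hs : (PySem.List.slice v (some 0) (some (min d ((v.length : Int) - 1) + 1))).sum
      = pvW v d.toNat v.length (0 - 1) := by
    rcases Nat.eq_zero_or_pos v.length with h | h
    · have hv : v = [] := List.eq_nil_of_length_eq_zero h
      subst hv
      simp [pvW, pvS, PySem.List.slice]
    · have hb : (0 : Int) ≤ min d ((v.length : Int) - 1) + 1 := by omega
      rw [PySem.List.slice_zero_start, PySem.List.slice_to _ hb]
      have ht : (min d ((v.length : Int) - 1) + 1).toNat = min (0 + d.toNat) (v.length - 1) + 1 := by omega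
      rw [ht]
      show pvS v _ = pvW v d.toNat v.length 0
      rw [pvW]
      simp [pvS]
  rw [hs, pvWindowGo_spec v mask d hd v.length rfl (v.length - 0) 0 _ rfl rfl]
  rw [List.range_eq_range']
  simp

theorem pvWindowB_length (v : List Int) (mask : List Bool) (d : Int) (hd : 0 ≤ d) :
    (pvWindowB v mask d).length = v.length := by
  rw [pvWindowB_spec v mask d hd]; simp

theorem pvMask_getD (rowc : List Char) (n k : Nat) (h : k < n) :
    (pvMask rowc n).getD k false = (rowc.getD k '#' != '#') := by
  rw [pvMask, PySem.List.getD_map_range _ n k false h]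

theorem pvRow_congr (rowc : List Char) (v w : List Int) (d : Int) (hd : 0 ≤ d) (n : Nat)
    (hv : v.length = n) (hw : w.length = n)
    (hc : ∀ k, k < n → v.getD k 0 ≡ w.getD k 0 [ZMOD pvMod]) :
    (pvStageA rowc (pvPrefixA v) d n).length = n ∧
    (pvWindowB w (pvMask rowc n) d).length = n ∧
    ∀ k, k < n →
      (pvStageA rowc (pvPrefixA v) d n).getD k 0 ≡ (pvWindowB w (pvMask rowc n) d).getD k 0 [ZMOD pvMod] := by
  refine ⟨pvStageA_length _ _ _ _, by rw [pvWindowB_length _ _ _ hd, hw], ?_⟩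
  intro k hk
  have hA := pvStageA_spec rowc v d n k hd hv hk
  rw [pvWindowB_spec w _ d hd, hw, PySem.List.getD_map_range _ n k 0 hk, pvMask_getD rowc n k hk]
  by_cases hb : rowc.getD k '#' = '#'
  · have hbf : (rowc.getD k '#' != '#') = false := by simpa using hb
    rw [hbf]
    rw [if_pos hb] at hA
    simpa using hA
  · have hbb : (rowc.getD k '#' != '#') = true := by simpa using hb
    rw [hbb]
    rw [if_neg hb] at hA
    simpa using hA.trans ((pvW_congr v w d.toNat n k (by omega) (fun j hj => hc j (by omega))).trans
      (pvMod_modEq _).symm)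

theorem pvLoop_congr (maxDist dcol : Int) (hd : 0 ≤ maxDist) (hdc : 0 ≤ dcol) (n : Nat)
    (rows : List String) :
    ∀ (v w : List Int), v.length = n → w.length = n →
    (∀ k, k < n → v.getD k 0 ≡ w.getD k 0 [ZMOD pvMod]) →
    (pvLoopA maxDist dcol n rows v).length = n ∧
    (pvLoopB maxDist dcol n rows w).length = n ∧
    ∀ k, k < n → (pvLoopA maxDist dcol n rows v).getD k 0 ≡ (pvLoopB maxDist dcol n rows w).getD k 0 [ZMOD pvMod] := by
  induction rows with
  | nil => intro v w hv hw hc; exact ⟨hv, hw, hc⟩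
  | cons srow rest ih =>
    intro v w hv hw hc
    obtain ⟨h1, h2, h3⟩ := pvRow_congr srow.toList v w dcol hdc n hv hw hc
    obtain ⟨h4, h5, h6⟩ := pvRow_congr srow.toList _ _ maxDist hd n h1 h2 h3
    simpa only [pvLoopA, pvLoopB] using ih _ _ h4 h5 h6

-- first row
theorem pvInd_length (rowc : List Char) (n : Nat) :
    ((pvMask rowc n).map (fun m => if m then (1 : Int) else 0)).length = n := by simp [pvMask]

theorem pvInd_getD (rowc : List Char) (n k : Nat) (hk : k < n) :
    ((pvMask rowc n).map (fun m => if m then (1 : Int) else 0)).getD k 0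
      = if rowc.getD k '#' = '#' then 0 else 1 := by
  rw [pvMask, List.map_map, PySem.List.getD_map_range _ n k 0 hk]
  by_cases hb : rowc.getD k '#' = '#' <;> simp

theorem pvCountSafe_eq (rowc : List Char) (n : Nat) (a b : Nat) (hab : a ≤ b) (hbn : b ≤ n) :
    pvCountSafe rowc (PySem.List.pyRange (a : Int) (b : Int) 1) =
      pvS ((pvMask rowc n).map (fun m => if m then (1 : Int) else 0)) b
        - pvS ((pvMask rowc n).map (fun m => if m then (1 : Int) else 0)) a := by
  induction b, hab using Nat.le_induction with
  | base =>
    rw [PySem.List.pyRange_one_eq_nil (le_refl _)]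
    simp [pvCountSafe]
  | succ b hb ih =>
    have hcast : ((b + 1 : Nat) : Int) = (b : Int) + 1 := by push_cast; ring
    rw [hcast, PySem.List.pyRange_one_succ_right (by exact_mod_cast hb)]
    unfold pvCountSafe at *
    rw [List.foldl_append]
    simp only [List.foldl_cons, List.foldl_nil]
    rw [ih (by omega)]
    rw [pvS_succ _ b (by rw [pvInd_length]; omega)]
    rw [pvInd_getD rowc n b (by omega)]
    have ht : ((b : Int)).toNat = b := by omega
    rw [ht]
    by_cases hsafe : rowc.getD b '#' = '#'
    · rw [if_neg (not_not_intro hsafe), if_pos hsafe]; ring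
    · rw [if_pos hsafe, if_neg hsafe]; ring

theorem pvFirstRowA_getD (rowc : List Char) (maxDist : Int) (n c : Nat)
    (hd : 0 ≤ maxDist) (hc : c < n) :
    (pvFirstRowA rowc maxDist n).getD c 0 =
      if rowc.getD c '#' = '#' then 0
      else pvW ((pvMask rowc n).map (fun m => if m then (1 : Int) else 0)) maxDist.toNat n c := by
  rw [pvFirstRowA, PySem.List.getD_map_range _ n c 0 hc]
  by_cases hb : rowc.getD c '#' = '#'
  · rw [if_pos hb, if_pos hb]
  · rw [if_neg hb, if_neg hb]
    have e1 : (c : Int) + 1 = ((c + 1 : Nat) : Int) := by push_cast; ring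
    have e2 : min ((c : Int) + maxDist) ((n : Int) - 1) + 1
        = ((min (c + maxDist.toNat) (n - 1) + 1 : Nat) : Int) := by omega
    have e3 : max 0 ((c : Int) - maxDist) = ((c - maxDist.toNat : Nat) : Int) := by omega
    rw [e1, e2, e3]
    rw [pvCountSafe_eq rowc n (c + 1) (min (c + maxDist.toNat) (n - 1) + 1) (by omega) (by omega)]
    rw [pvCountSafe_eq rowc n (c - maxDist.toNat) c (by omega) (by omega)]
    rw [pvW]
    rw [pvS_succ _ c (by rw [pvInd_length]; omega)]
    rw [pvInd_getD rowc n c hc, if_neg hb]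
    ring

theorem pvFirst_congr (rowc : List Char) (maxDist : Int) (n : Nat) (hd : 0 ≤ maxDist) :
    (pvFirstRowA rowc maxDist n).length = n ∧
    (pvWindowB ((pvMask rowc n).map (fun m => if m then (1 : Int) else 0)) (pvMask rowc n) maxDist).length = n ∧
    ∀ k, k < n →
      (pvFirstRowA rowc maxDist n).getD k 0 ≡
      (pvWindowB ((pvMask rowc n).map (fun m => if m then (1 : Int) else 0)) (pvMask rowc n) maxDist).getD k 0 [ZMOD pvMod] := by
  refine ⟨by simp [pvFirstRowA], by rw [pvWindowB_length _ _ _ hd, pvInd_length], ?_⟩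
  intro k hk
  rw [pvFirstRowA_getD rowc maxDist n k hd hk]
  rw [pvWindowB_spec _ _ _ hd, pvInd_length, PySem.List.getD_map_range _ n k 0 hk, pvMask_getD rowc n k hk]
  by_cases hb : rowc.getD k '#' = '#'
  · have hbf : (rowc.getD k '#' != '#') = false := by simpa using hb
    rw [if_pos hb, hbf]
    simp
  · have hbb : (rowc.getD k '#' != '#') = true := by simpa using hb
    rw [if_neg hb, hbb]
    simpa using (pvMod_modEq _).symm

-- maxColDist: A's break-scan equals B's direct count (the predicate is monotone)
theorem pvMaxColLoop_eq_count (M2 : Int) :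
    ∀ (len s : Nat), 1 ≤ s → 1 + ((s : Int) - 1) * ((s : Int) - 1) ≤ M2 →
      pvMaxColLoop M2 (List.range' s len) (s - 1)
        = s - 1 + (List.range' s len).countP (fun c : Nat => decide (1 + (c : Int) * (c : Int) ≤ M2)) := by
  intro len
  induction len with
  | zero => intro s hs hp; simp [pvMaxColLoop]
  | succ len ih =>
    intro s hs hp
    rw [List.range'_succ]
    by_cases h : 1 + (s : Int) * (s : Int) ≤ M2
    · simp only [pvMaxColLoop, if_pos h]
      have hih := ih (s + 1) (by omega) (by push_cast; simpa using h)
      simp only [Nat.add_sub_cancel] at hih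
      rw [hih, List.countP_cons]
      have hps : decide (1 + (s : Int) * (s : Int) ≤ M2) = true := by simpa using h
      rw [hps]
      simp
      omega
    · simp only [pvMaxColLoop, if_neg h]
      have hz : (s :: List.range' (s + 1) len).countP (fun c : Nat => decide (1 + (c : Int) * (c : Int) ≤ M2)) = 0 := by
        rw [List.countP_eq_zero]
        intro c hmem
        have hcs : s ≤ c := by
          rcases List.mem_cons.mp hmem with h0 | h0
          · omega
          · have := (List.mem_range'_1.mp h0).1; omega
        simp only [decide_eq_true_eq]
        intro hcc
        apply h
        have h1 : (s : Int) ≤ (c : Int) := by exact_mod_cast hcs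
        have h2 : (s : Int) * (s : Int) ≤ (c : Int) * (c : Int) := by nlinarith [Int.natCast_nonneg s]
        linarith
      rw [hz]
      omega

theorem pvDcol_eq (maxDist : Int) (cols : Nat) :
    ((pvMaxColLoop (maxDist * maxDist) (List.range cols) 0 : Nat) : Int)
      = (((PySem.List.pyRange 1 (cols : Int) 1).countP
            (fun c => decide (1 + c * c ≤ maxDist * maxDist)) : Nat) : Int) := by
  cases cols with
  | zero => simp [pvMaxColLoop, PySem.List.pyRange_one_eq_nil]
  | succ m =>
    have hR : PySem.List.pyRange 1 ((m + 1 : Nat) : Int) 1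
        = (List.range' 1 m).map (fun c : Nat => (c : Int)) := by
      rw [PySem.List.pyRange_one, List.range'_eq_map_range, List.map_map]
      have hm : (((m + 1 : Nat) : Int) - 1).toNat = m := by omega
      rw [hm]
      apply List.map_congr_left
      intro k _
      simp only [Function.comp_apply]
      push_cast
      ring
    rw [hR, List.countP_map]
    have hfun : ((fun c : Int => decide (1 + c * c ≤ maxDist * maxDist)) ∘ (fun c : Nat => (c : Int)))
        = (fun c : Nat => decide (1 + (c : Int) * (c : Int) ≤ maxDist * maxDist)) := rfl
    rw [hfun]
    rw [List.range_eq_range', List.range'_succ]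
    by_cases h0 : 1 + (0 : Int) * (0 : Int) ≤ maxDist * maxDist
    · simp only [pvMaxColLoop, Nat.cast_zero, if_pos h0]
      have hcnt := pvMaxColLoop_eq_count (maxDist * maxDist) m 1 (by omega) (by simpa using h0)
      simp only [Nat.sub_self] at hcnt
      rw [hcnt]
      simp
    · simp only [pvMaxColLoop, Nat.cast_zero, if_neg h0]
      have hz : (List.range' 1 m).countP
          (fun c : Nat => decide (1 + (c : Int) * (c : Int) ≤ maxDist * maxDist)) = 0 := by
        rw [List.countP_eq_zero]
        intro c hmem
        simp only [decide_eq_true_eq]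
        intro hcc
        apply h0
        have h2 : (0 : Int) ≤ (c : Int) * (c : Int) := mul_self_nonneg _
        linarith
      rw [hz]
      simp

-- final sum congruence
theorem pvSum_congr (v w : List Int) (hl : v.length = w.length)
    (h : ∀ k, k < v.length → v.getD k 0 ≡ w.getD k 0 [ZMOD pvMod]) :
    v.sum ≡ w.sum [ZMOD pvMod] := by
  have := pvS_congr v w hl h v.length
  simpa [pvS, List.take_of_length_le (le_refl v.length), List.take_of_length_le (le_of_eq hl.symm)] using this

-- ===== VERDICT (by name: the statement is the Claim_ definition above) =====
theorem numberOfRoutes_spec : Claim_equal_numberOfRoutes := by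
  intro grid maxDist hdom hpre
  obtain ⟨hne, hd, -⟩ := hpre
  unfold Spec_numberOfRoutes numberOfRoutes numberOfRoutes_alt
  rw [← pvDcol_eq maxDist (grid.headD "").toList.length]
  obtain ⟨h1, h2, h3⟩ := pvFirst_congr (grid.headD "").toList maxDist (grid.headD "").toList.length hd
  obtain ⟨h4, h5, h6⟩ := pvLoop_congr maxDist _ hd (Int.natCast_nonneg _) (grid.headD "").toList.length grid.tail _ _ h1 h2 h3
  have hsum := pvSum_congr _ _ (by rw [h4, h5]) (fun k hk => h6 k (by rwa [h4] at hk))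
  rw [PySem.Int.mod_eq_emod_of_pos pvMod_pos, PySem.Int.mod_eq_emod_of_pos pvMod_pos]
  exact hsum
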